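-- pv_equiv track=rewrite | github.com/demianAdli/python_dsa | pythonic_dsa_chapter_04/summation_puzzle.py | eq_dict
-- ===== SOURCE A (Python) =====
-- def eq_dict(equation):
--     no_duplicate = {"+": 0, "=": 0}
--     ind = 0
--     for letter in equation:
--         if letter not in no_duplicate and letter not in '+=':
--             no_duplicate[letter] = ind
--             ind += 1
--     return no_duplicate
-- ===== SOURCE B (Python) =====
-- def eq_dict(equation):
--     # Stateless per-position formulation: a letter's index is the number of
--     # distinct non-'+=' letters occurring strictly before its first occurrence.
--     result = {'+': 0, '=': 0}
--     for i, c in enumerate(equation):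
--         if c not in '+=' and c not in equation[:i]:
--             result[c] = len({d for d in equation[:i] if d not in '+='})
--     return result
-- ===== Notes on version B (the rewrite author's own statement) =====
-- stated objective: alternative
-- what changed: A threads a growing dict plus a running counter through one loop; B is stateless per position: it detects a first occurrence by membership in the input prefix equation[:i] and computes the letter's index as a closed form, the size of the set of non-operator letters in that prefix.
import Mathlib
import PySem

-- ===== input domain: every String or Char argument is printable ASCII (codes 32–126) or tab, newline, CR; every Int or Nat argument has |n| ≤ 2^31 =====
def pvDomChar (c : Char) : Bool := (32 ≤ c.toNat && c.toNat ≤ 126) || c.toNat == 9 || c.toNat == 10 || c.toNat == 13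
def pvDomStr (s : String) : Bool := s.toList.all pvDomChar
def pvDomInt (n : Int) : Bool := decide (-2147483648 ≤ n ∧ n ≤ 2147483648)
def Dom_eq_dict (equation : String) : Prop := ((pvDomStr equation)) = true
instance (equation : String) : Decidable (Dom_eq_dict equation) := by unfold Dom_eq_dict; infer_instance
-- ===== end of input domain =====

-- B drops A's running counter and growing-dict membership test: it detects a first occurrence
-- by membership in the input prefix equation[:i] and computes each letter's index as a closed
-- form (size of the set of non-'+=' letters in that prefix); objective: alternative, same result.

-- ===== PORT A =====
def eq_dict (equation : String) : List (String × Int) :=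
  (equation.toList.foldl
    (fun (st : PySem.Dict String Int × Int) c =>
      if !(st.1.contains (String.ofList [c])) && !(PySem.Str.isIn (String.ofList [c]) "+=") then
        (st.1.insert (String.ofList [c]) st.2, st.2 + 1)
      else st)
    (PySem.Dict.ofList [("+", 0), ("=", 0)], 0)).1.items

-- ===== PORT B =====
def eq_dict_alt (equation : String) : List (String × Int) :=
  ((PySem.List.enumerate equation.toList).foldl
    (fun (d : PySem.Dict String Int) (p : Int × Char) =>
      if !(PySem.Str.isIn (String.ofList [p.2]) "+=") &&
         !(PySem.Str.isIn (String.ofList [p.2])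
             (String.ofList (PySem.List.slice equation.toList none (some p.1)))) then
        d.insert (String.ofList [p.2])
          ((PySem.Set.ofList ((PySem.List.slice equation.toList none (some p.1)).filter
              (fun e => !(PySem.Str.isIn (String.ofList [e]) "+=")))).length : Int)
      else d)
    (PySem.Dict.ofList [("+", 0), ("=", 0)])).items

-- ===== PRECONDITION & SPEC =====
def Spec_eq_dict (equation : String) (out : List (String × Int)) : Prop := out = eq_dict_alt equation
instance (equation : String) (out : List (String × Int)) : Decidable (Spec_eq_dict equation out) := by unfold Spec_eq_dict; infer_instance

-- ===== CLAIM (what is proved, stated in full; the proofs are below) =====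
def Claim_equal_eq_dict : Prop := ∀ (equation : String), Dom_eq_dict equation → Spec_eq_dict equation (eq_dict equation)

-- ===== LEMMAS AND PROOFS =====

-- 'c in s' for a single character c is exactly membership of c among s's characters.
theorem isIn_single (c : Char) (s : List Char) :
    PySem.Chars.isIn [c] s = decide (c ∈ s) := by
  by_cases h : c ∈ s
  · obtain ⟨l1, l2, he⟩ := List.append_of_mem h
    have ht : PySem.Chars.isIn [c] s = true :=
      (PySem.Chars.isIn_iff_infix _ _).mpr ⟨l1, l2, by simp [he]⟩
    simp [ht, h]
  · have hf : PySem.Chars.isIn [c] s = false := by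
      rw [Bool.eq_false_iff]
      intro ht
      exact h (((PySem.Chars.isIn_iff_infix _ _).mp ht).subset (by simp))
    simp [hf, h]

theorem strIsIn_single (c : Char) (s : List Char) :
    PySem.Str.isIn (String.ofList [c]) (String.ofList s) = decide (c ∈ s) := by
  simp [isIn_single]

theorem isIn_pm (c : Char) :
    PySem.Str.isIn (String.ofList [c]) "+=" = (c == '+' || c == '=') := by
  have h : PySem.Str.isIn (String.ofList [c]) "+=" = decide (c ∈ ['+', '=']) := by
    simp [isIn_single]
  rw [h]
  by_cases h1 : c = '+' <;> by_cases h2 : c = '=' <;> simp [h1, h2]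

theorem mkstr_inj {a b : Char} (h : String.ofList [a] = String.ofList [b]) : a = b := by
  have h2 : (String.ofList [a]).toList = (String.ofList [b]).toList := by rw [h]
  simpa using h2

def keyed (S : List Char) : List (String × Int) :=
  (PySem.List.enumerate S).map (fun p => (String.ofList [p.2], p.1))

theorem keyed_append_singleton (S : List Char) (c : Char) :
    keyed (S ++ [c]) = keyed S ++ [(String.ofList [c], (S.length : Int))] := by
  simp [keyed, PySem.List.enumerate_append, PySem.List.enumerate_cons]

theorem map_key_enumerate (S : List Char) :
    (PySem.List.enumerate S).map (fun p => String.ofList [p.2])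
      = S.map (fun c => String.ofList [c]) := by
  calc (PySem.List.enumerate S).map (fun p => String.ofList [p.2])
      = ((PySem.List.enumerate S).map (fun p => p.2)).map (fun c => String.ofList [c]) := by
        rw [List.map_map]; rfl
    _ = S.map (fun c => String.ofList [c]) := by rw [PySem.List.map_snd_enumerate]

theorem keys_keyed (S : List Char) :
    (keyed S).map (·.1) = S.map (fun c => String.ofList [c]) := by
  simpa [keyed, List.map_map, Function.comp] using map_key_enumerate S

-- membership test of the seeded dict, characterised by the letters recorded so far
theorem contains_seen (S : List Char) (c : Char) (hc : c ≠ '+' ∧ c ≠ '=') :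
    (PySem.Dict.mk (("+", 0) :: ("=", 0) :: keyed S) : PySem.Dict String Int).contains
      (String.ofList [c]) = decide (c ∈ S) := by
  rw [PySem.Dict.contains_eq_decide_mem_keys]
  have hk : (PySem.Dict.mk (κ := String) (ν := Int) (("+", 0) :: ("=", 0) :: keyed S)).keys
      = "+" :: "=" :: (keyed S).map (·.1) := by
    simp [PySem.Dict.keys]
  rw [hk, keys_keyed]
  have h2 : String.ofList [c] ≠ "+" := fun h' => hc.1 (mkstr_inj h')
  have h3 : String.ofList [c] ≠ "=" := fun h' => hc.2 (mkstr_inj h')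
  by_cases h : c ∈ S
  · have : String.ofList [c] ∈ S.map (fun c => String.ofList [c]) := List.mem_map_of_mem h
    simp [h, this]
  · have h1 : String.ofList [c] ∉ S.map (fun c => String.ofList [c]) := by
      intro hm
      obtain ⟨a, ha, hae⟩ := List.mem_map.mp hm
      exact h (mkstr_inj hae.symm ▸ ha)
    simp [h, h1, h2, h3]

-- A's loop step, named so the invariant proof can rewrite one step at a time
def stepA (st : PySem.Dict String Int × Int) (c : Char) : PySem.Dict String Int × Int :=
  if !(st.1.contains (String.ofList [c])) && !(PySem.Str.isIn (String.ofList [c]) "+=") then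
    (st.1.insert (String.ofList [c]) st.2, st.2 + 1)
  else st

theorem stepA_skip (d : PySem.Dict String Int) (n : Int) (c : Char)
    (h : (!(d.contains (String.ofList [c])) && !(PySem.Str.isIn (String.ofList [c]) "+=")) = false) :
    stepA (d, n) c = (d, n) := by
  unfold stepA; rw [h]; simp

theorem stepA_add (d : PySem.Dict String Int) (n : Int) (c : Char)
    (h : (!(d.contains (String.ofList [c])) && !(PySem.Str.isIn (String.ofList [c]) "+=")) = true) :
    stepA (d, n) c = (d.insert (String.ofList [c]) n, n + 1) := by
  unfold stepA; rw [h]; simp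

-- invariant for A's loop: the dict's items are the seed followed by the deduped letters, keyed
theorem A_loop (l S : List Char) (hnd : S.Nodup)
    (hpm : ∀ c ∈ S, c ≠ '+' ∧ c ≠ '=') :
    (l.foldl stepA (PySem.Dict.mk (("+", 0) :: ("=", 0) :: keyed S), (S.length : Int)))
    =
    (PySem.Dict.mk (("+", 0) :: ("=", 0) ::
        keyed ((l.filter (fun c => !(PySem.Str.isIn (String.ofList [c]) "+="))).foldl PySem.Set.add S)),
      (((l.filter (fun c => !(PySem.Str.isIn (String.ofList [c]) "+="))).foldl PySem.Set.add S).length : Int)) := by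
  induction l generalizing S with
  | nil => simp
  | cons c l ih =>
    by_cases hc : c = '+' ∨ c = '='
    · have hin : PySem.Str.isIn (String.ofList [c]) "+=" = true := by
        rcases hc with h | h <;> subst h <;> decide
      rw [List.foldl_cons, stepA_skip _ _ _ (by rw [hin]; simp),
        List.filter_cons_of_neg (by rw [hin]; simp)]
      exact ih S hnd hpm
    · push Not at hc
      have hin : PySem.Str.isIn (String.ofList [c]) "+=" = false := by
        rw [isIn_pm]; simp [hc.1, hc.2]
      have hmem := contains_seen S c hc
      by_cases hS : c ∈ S
      · have hadd : PySem.Set.add S c = S := by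
          simp [PySem.Set.add, PySem.Set.contains, hS]
        rw [List.foldl_cons, stepA_skip _ _ _ (by rw [hmem, hin]; simp [hS]),
          List.filter_cons_of_pos (by rw [hin]; simp), List.foldl_cons, hadd]
        exact ih S hnd hpm
      · have hadd : PySem.Set.add S c = S ++ [c] := by
          simp [PySem.Set.add, PySem.Set.contains, hS]
        rw [List.foldl_cons, stepA_add _ _ _ (by rw [hmem, hin]; simp [hS]),
          List.filter_cons_of_pos (by rw [hin]; simp), List.foldl_cons, hadd]
        have hins : (PySem.Dict.mk (κ := String) (ν := Int)
            (("+", 0) :: ("=", 0) :: keyed S)).insert (String.ofList [c]) (S.length : Int)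
            = PySem.Dict.mk (("+", 0) :: ("=", 0) :: keyed (S ++ [c])) := by
          apply PySem.Dict.ext
          rw [PySem.Dict.items_insert_of_not_contains _ _ (by rw [hmem]; simp [hS])]
          simp [keyed_append_singleton]
        have hlen : ((S : List Char).length : Int) + 1 = ((S ++ [c]).length : Int) := by
          simp
        rw [hins, hlen]
        exact ih (S ++ [c])
          (by rw [List.nodup_append]; exact ⟨hnd, List.nodup_singleton c, by intro a ha b hb hab; simp at hb; subst hb; subst hab; exact hS ha⟩)
          (by intro a ha
              rcases List.mem_append.mp ha with h | h
              · exact hpm a h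
              · simp at h; subst h; exact hc)

-- the filter predicate both ports use, as a named function
def predL (c : Char) : Bool := !(PySem.Str.isIn (String.ofList [c]) "+=")

-- the deduped non-'+=' letters of a prefix
def dd (P : List Char) : List Char := PySem.List.dedup (P.filter predL)

theorem mem_dd (P : List Char) (c : Char) (hc : predL c = true) : c ∈ dd P ↔ c ∈ P := by
  rw [dd, PySem.List.mem_dedup, List.mem_filter]
  exact ⟨fun h => h.1, fun h => ⟨h, hc⟩⟩

theorem dd_append_pm (P : List Char) (c : Char) (hc : predL c = false) :
    dd (P ++ [c]) = dd P := by
  simp [dd, List.filter_append, hc]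

theorem dd_append (P : List Char) (c : Char) (hc : predL c = true) :
    dd (P ++ [c]) = if c ∈ P then dd P else dd P ++ [c] := by
  have h1 : (P ++ [c]).filter predL = P.filter predL ++ [c] := by
    simp [List.filter_append, hc]
  have h2 : dd (P ++ [c]) = PySem.Set.add (dd P) c := by
    rw [dd, dd, h1, PySem.List.dedup_eq_ofList, PySem.List.dedup_eq_ofList,
      PySem.Set.ofList_eq_foldl, PySem.Set.ofList_eq_foldl, List.foldl_append]
    rfl
  rw [h2]
  by_cases h : c ∈ P
  · rw [if_pos h]
    simp [PySem.Set.add, PySem.Set.contains, (mem_dd P c hc).mpr h]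
  · rw [if_neg h]
    have hnd : c ∉ dd P := fun hx => h ((mem_dd P c hc).mp hx)
    simp [PySem.Set.add, PySem.Set.contains, hnd]

-- B's loop step, closed over the full character list E
def stepB (E : List Char) (d : PySem.Dict String Int) (p : Int × Char) : PySem.Dict String Int :=
  if !(PySem.Str.isIn (String.ofList [p.2]) "+=") &&
     !(PySem.Str.isIn (String.ofList [p.2])
         (String.ofList (PySem.List.slice E none (some p.1)))) then
    d.insert (String.ofList [p.2])
      ((PySem.Set.ofList ((PySem.List.slice E none (some p.1)).filter
          (fun e => !(PySem.Str.isIn (String.ofList [e]) "+=")))).length : Int)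
  else d

-- one step of B at a first / repeated / operator position
theorem stepB_eq (E P l : List Char) (c : Char) (hE : E = P ++ c :: l) :
    stepB E (PySem.Dict.mk (("+", 0) :: ("=", 0) :: keyed (dd P))) ((P.length : Int), c)
      = PySem.Dict.mk (("+", 0) :: ("=", 0) :: keyed (dd (P ++ [c]))) := by
  have hslice : PySem.List.slice E none (some (P.length : Int)) = P := by
    rw [PySem.List.slice_to_natCast, hE, List.take_left]
  unfold stepB
  simp only [hslice]
  by_cases hpm : predL c = true
  · have h1 : PySem.Str.isIn (String.ofList [c]) "+=" = false := by
      simpa [predL] using hpm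
    have hc : c ≠ '+' ∧ c ≠ '=' := by
      have h1' := h1
      rw [isIn_pm] at h1'
      constructor <;> intro h <;> subst h <;> simp at h1'
    by_cases hP : c ∈ P
    · have h2 : PySem.Str.isIn (String.ofList [c]) (String.ofList P) = true := by
        rw [strIsIn_single]; simp [hP]
      have hcond : (!(PySem.Str.isIn (String.ofList [c]) "+=") &&
          !(PySem.Str.isIn (String.ofList [c]) (String.ofList P))) = false := by
        rw [h2]; simp
      rw [dd_append P c hpm, if_pos hP]
      simp only [hcond]
      simp
    · have h2 : PySem.Str.isIn (String.ofList [c]) (String.ofList P) = false := by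
        rw [strIsIn_single]; simp [hP]
      have hcond : (!(PySem.Str.isIn (String.ofList [c]) "+=") &&
          !(PySem.Str.isIn (String.ofList [c]) (String.ofList P))) = true := by
        rw [h1, h2]; simp
      rw [dd_append P c hpm, if_neg hP]
      simp only [hcond, if_true]
      have hfil : P.filter (fun e => !(PySem.Str.isIn (String.ofList [e]) "+=")) = P.filter predL := rfl
      have hval : ((PySem.Set.ofList (P.filter
          (fun e => !(PySem.Str.isIn (String.ofList [e]) "+=")))).length : Int)
          = ((dd P).length : Int) := by
        rw [hfil, dd, PySem.List.dedup_eq_ofList]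
      rw [hval]
      have hnotin : (PySem.Dict.mk (("+", 0) :: ("=", 0) :: keyed (dd P)) :
          PySem.Dict String Int).contains (String.ofList [c]) = false := by
        rw [contains_seen _ _ hc]
        have : c ∉ dd P := fun hx => hP ((mem_dd P c hpm).mp hx)
        simp [this]
      apply PySem.Dict.ext
      rw [PySem.Dict.items_insert_of_not_contains _ _ hnotin, keyed_append_singleton]
      simp
  · have hf : predL c = false := by
      revert hpm; cases h' : predL c <;> simp
    have h1 : PySem.Str.isIn (String.ofList [c]) "+=" = true := by
      simpa [predL] using hf
    have hcond : (!(PySem.Str.isIn (String.ofList [c]) "+=") &&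
        !(PySem.Str.isIn (String.ofList [c]) (String.ofList P))) = false := by
      rw [h1]; simp
    rw [dd_append_pm P c hf]
    simp only [hcond]
    simp

-- invariant for B's loop: processing the suffix l after prefix P turns the dict for P into the dict for P ++ l
theorem B_loop (E P l : List Char) (hE : E = P ++ l) :
    (PySem.List.enumerate l (P.length : Int)).foldl (stepB E)
      (PySem.Dict.mk (("+", 0) :: ("=", 0) :: keyed (dd P)))
    = PySem.Dict.mk (("+", 0) :: ("=", 0) :: keyed (dd (P ++ l))) := by
  induction l generalizing P with
  | nil => simp
  | cons c l ih =>
    rw [PySem.List.enumerate_cons, List.foldl_cons, stepB_eq E P l c hE]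
    have hlen : (P.length : Int) + 1 = (((P ++ [c]).length : Int)) := by simp
    rw [hlen, ih (P ++ [c]) (by rw [hE, List.append_assoc]; rfl), List.append_assoc]
    rfl

-- ===== VERDICT (by name: the statement is the Claim_ definition above) =====
theorem eq_dict_spec : Claim_equal_eq_dict := by
  intro equation _
  unfold Spec_eq_dict eq_dict eq_dict_alt
  have hz : ((([] : List Char).length : Int)) = (0 : Int) := by simp
  have hfold : (equation.toList.filter
      (fun c => !(PySem.Str.isIn (String.ofList [c]) "+="))).foldl PySem.Set.add []
      = dd equation.toList := by
    rw [dd, PySem.List.dedup_eq_ofList, PySem.Set.ofList_eq_foldl]; rfl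
  have hA' := A_loop equation.toList [] (by simp) (by simp)
  rw [hz, hfold] at hA'
  have hB' := B_loop equation.toList [] equation.toList rfl
  rw [hz] at hB'
  have hB'' : ((PySem.List.enumerate equation.toList).foldl (stepB equation.toList)
      (PySem.Dict.mk (("+", 0) :: ("=", 0) :: keyed (dd [])))).items
      = (("+", 0) :: ("=", 0) :: keyed (dd equation.toList) : List (String × Int)) := by
    rw [show PySem.List.enumerate equation.toList
        = PySem.List.enumerate equation.toList (0 : Int) from rfl, hB']
    simp
  calc (equation.toList.foldl
      (fun (st : PySem.Dict String Int × Int) c =>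
        if !(st.1.contains (String.ofList [c])) && !(PySem.Str.isIn (String.ofList [c]) "+=") then
          (st.1.insert (String.ofList [c]) st.2, st.2 + 1)
        else st)
      (PySem.Dict.ofList [("+", 0), ("=", 0)], 0)).1.items
      = (("+", 0) :: ("=", 0) :: keyed (dd equation.toList) : List (String × Int)) := by
        rw [show (equation.toList.foldl
            (fun (st : PySem.Dict String Int × Int) c =>
              if !(st.1.contains (String.ofList [c])) && !(PySem.Str.isIn (String.ofList [c]) "+=") then
                (st.1.insert (String.ofList [c]) st.2, st.2 + 1)
              else st)
            (PySem.Dict.ofList [("+", 0), ("=", 0)], 0))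
            = equation.toList.foldl stepA
                (PySem.Dict.mk (("+", 0) :: ("=", 0) :: keyed []), (0 : Int)) from rfl, hA']
      _ = _ := by
        rw [show ((PySem.List.enumerate equation.toList).foldl
            (fun (d : PySem.Dict String Int) (p : Int × Char) =>
              if !(PySem.Str.isIn (String.ofList [p.2]) "+=") &&
                 !(PySem.Str.isIn (String.ofList [p.2])
                     (String.ofList (PySem.List.slice equation.toList none (some p.1)))) then
                d.insert (String.ofList [p.2])
                  ((PySem.Set.ofList ((PySem.List.slice equation.toList none (some p.1)).filter
                      (fun e => !(PySem.Str.isIn (String.ofList [e]) "+=")))).length : Int)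
              else d)
            (PySem.Dict.ofList [("+", 0), ("=", 0)])).items
            = ((PySem.List.enumerate equation.toList).foldl (stepB equation.toList)
                (PySem.Dict.mk (("+", 0) :: ("=", 0) :: keyed (dd [])))).items from rfl, hB'']
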